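-- pv_equiv track=rewrite | github.com/borasean010-stack/BORACAY_SEAN | update_menu.py | get_new_menu
-- ===== SOURCE A (Python) =====
-- mapping = {
--     'essential': ['essential-tours.html', 'pickup-sending.html', 'hopping-tour.html', 'malumpati.html'],
--     'activity': ['activities.html', 'freediving.html', 'land-tour.html', 'jl-snap.html', 'bora-ajae-hopping.html', 'parasailing.html', 'scuba-diving.html', 'helmet-diving.html', 'jetski.html', 'island-tour.html'],
--     'massage': ['massage.html', 'aspa.html', 'spa.html', 'poseidon.html', 'maris.html', 'kabayan.html', 'luna.html', 'boraspa.html', 'helios.html'],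
--     'price-list': ['price-list.html'],
--     'cart': ['cart.html']
-- }
--
-- def get_new_menu(filename):
--     active_cat = None
--     for cat, files in mapping.items():
--         if filename in files:
--             active_cat = cat
--             break
--
--     menu_html = '<div class="menu">\n'
--
--     # 보라카이 필수투어
--     essential_active = ' active' if active_cat == 'essential' else ''
--     menu_html += f'        <a href="essential-tours.html" class="tab-link{essential_active}" data-category="essential">보라카이 필수투어</a>\n'
--
--     # 액티비티
--     activity_active = ' active' if active_cat == 'activity' else ''
--     menu_html += f'        <a href="activities.html" class="tab-link{activity_active}" data-category="activity">액티비티</a>\n'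
--
--     # 마사지
--     massage_active = ' active' if active_cat == 'massage' else ''
--     menu_html += f'        <a href="massage.html" class="tab-link{massage_active}" data-category="massage">마사지</a>\n'
--
--     # 한눈에 요금표
--     price_active = ' active' if active_cat == 'price-list' else ''
--     menu_html += f'        <a href="price-list.html" class="tab-link{price_active}">한눈에 요금표</a>\n'
--
--     # 장바구니
--     cart_active = ' active' if active_cat == 'cart' else ''
--     menu_html += f'        <a href="cart.html" class="tab-link{cart_active}">장바구니</a>\n'
--
--     menu_html += '    </div>'
--     return menu_html
-- ===== SOURCE B (Python) =====
-- mapping = {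
--     'essential': ['essential-tours.html', 'pickup-sending.html', 'hopping-tour.html', 'malumpati.html'],
--     'activity': ['activities.html', 'freediving.html', 'land-tour.html', 'jl-snap.html', 'bora-ajae-hopping.html', 'parasailing.html', 'scuba-diving.html', 'helmet-diving.html', 'jetski.html', 'island-tour.html'],
--     'massage': ['massage.html', 'aspa.html', 'spa.html', 'poseidon.html', 'maris.html', 'kabayan.html', 'luna.html', 'boraspa.html', 'helios.html'],
--     'price-list': ['price-list.html'],
--     'cart': ['cart.html']
-- }
--
-- # reverse index built once: file -> category
-- _FILE_TO_CAT = {f: cat for cat, files in mapping.items() for f in files}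
--
-- # menu table: (href, category, has data-category attribute, label)
-- _ROWS = [
--     ('essential-tours.html', 'essential', True, '보라카이 필수투어'),
--     ('activities.html', 'activity', True, '액티비티'),
--     ('massage.html', 'massage', True, '마사지'),
--     ('price-list.html', 'price-list', False, '한눈에 요금표'),
--     ('cart.html', 'cart', False, '장바구니'),
-- ]
--
-- def get_new_menu(filename):
--     active = _FILE_TO_CAT.get(filename)
--     menu = '<div class="menu">\n'
--     for href, cat, has_attr, label in _ROWS:
--         cls = 'tab-link active' if active == cat else 'tab-link'
--         data = f' data-category="{cat}"' if has_attr else ''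
--         menu += f'        <a href="{href}" class="{cls}"{data}>{label}</a>\n'
--     return menu + '    </div>'
-- ===== Notes on version B (the rewrite author's own statement) =====
-- stated objective: simpler
-- what changed: Replaces A's linear scan over mapping plus five unrolled copy-pasted row concatenations with a reverse file-to-category dict built once and a single table-driven loop over a list of menu-row entries.
import Mathlib
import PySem

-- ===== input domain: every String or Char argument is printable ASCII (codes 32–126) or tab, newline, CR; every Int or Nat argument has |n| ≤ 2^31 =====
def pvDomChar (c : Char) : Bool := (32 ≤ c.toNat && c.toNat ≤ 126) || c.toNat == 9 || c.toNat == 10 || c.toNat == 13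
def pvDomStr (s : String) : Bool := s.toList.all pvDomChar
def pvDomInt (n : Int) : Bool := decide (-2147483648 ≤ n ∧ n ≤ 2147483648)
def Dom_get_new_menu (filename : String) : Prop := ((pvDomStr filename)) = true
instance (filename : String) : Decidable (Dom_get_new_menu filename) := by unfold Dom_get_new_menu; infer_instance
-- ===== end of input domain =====

-- B replaces A's five unrolled, copy-pasted row concatenations with a reverse file→category
-- index built once and a single table-driven loop over the menu rows (objective: simpler).

-- ===== PORT A =====
def pvMapping : List (String × List String) :=
  [("essential", ["essential-tours.html", "pickup-sending.html", "hopping-tour.html", "malumpati.html"]),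
   ("activity", ["activities.html", "freediving.html", "land-tour.html", "jl-snap.html", "bora-ajae-hopping.html", "parasailing.html", "scuba-diving.html", "helmet-diving.html", "jetski.html", "island-tour.html"]),
   ("massage", ["massage.html", "aspa.html", "spa.html", "poseidon.html", "maris.html", "kabayan.html", "luna.html", "boraspa.html", "helios.html"]),
   ("price-list", ["price-list.html"]),
   ("cart", ["cart.html"])]

-- A's 'for cat, files in mapping.items(): if filename in files: active_cat = cat; break'
def pvFindCat : List (String × List String) → String → Option String
  | [], _ => none
  | (cat, fs) :: rest, f => if f ∈ fs then some cat else pvFindCat rest f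

def get_new_menu (filename : String) : String :=
  let active_cat := pvFindCat pvMapping filename
  let menu_html := "<div class=\"menu\">\n"
  let essential_active := if active_cat == some "essential" then " active" else ""
  let menu_html := menu_html ++ "        <a href=\"essential-tours.html\" class=\"tab-link" ++ essential_active ++ "\" data-category=\"essential\">보라카이 필수투어</a>\n"
  let activity_active := if active_cat == some "activity" then " active" else ""
  let menu_html := menu_html ++ "        <a href=\"activities.html\" class=\"tab-link" ++ activity_active ++ "\" data-category=\"activity\">액티비티</a>\n"
  let massage_active := if active_cat == some "massage" then " active" else ""
  let menu_html := menu_html ++ "        <a href=\"massage.html\" class=\"tab-link" ++ massage_active ++ "\" data-category=\"massage\">마사지</a>\n"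
  let price_active := if active_cat == some "price-list" then " active" else ""
  let menu_html := menu_html ++ "        <a href=\"price-list.html\" class=\"tab-link" ++ price_active ++ "\">한눈에 요금표</a>\n"
  let cart_active := if active_cat == some "cart" then " active" else ""
  let menu_html := menu_html ++ "        <a href=\"cart.html\" class=\"tab-link" ++ cart_active ++ "\">장바구니</a>\n"
  menu_html ++ "    </div>"

-- ===== PORT B =====
def pvMappingB : List (String × List String) :=
  [("essential", ["essential-tours.html", "pickup-sending.html", "hopping-tour.html", "malumpati.html"]),
   ("activity", ["activities.html", "freediving.html", "land-tour.html", "jl-snap.html", "bora-ajae-hopping.html", "parasailing.html", "scuba-diving.html", "helmet-diving.html", "jetski.html", "island-tour.html"]),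
   ("massage", ["massage.html", "aspa.html", "spa.html", "poseidon.html", "maris.html", "kabayan.html", "luna.html", "boraspa.html", "helios.html"]),
   ("price-list", ["price-list.html"]),
   ("cart", ["cart.html"])]

-- Source B: _FILE_TO_CAT = {f: cat for cat, files in mapping.items() for f in files}
def pvFileToCat : PySem.Dict String String :=
  pvMappingB.foldl (fun d cf => cf.2.foldl (fun d f => d.insert f cf.1) d) PySem.Dict.empty

-- Source B: _ROWS = [(href, category, has data-category attribute, label), ...]
def pvRows : List (String × String × Bool × String) :=
  [("essential-tours.html", "essential", true, "보라카이 필수투어"),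
   ("activities.html", "activity", true, "액티비티"),
   ("massage.html", "massage", true, "마사지"),
   ("price-list.html", "price-list", false, "한눈에 요금표"),
   ("cart.html", "cart", false, "장바구니")]

def get_new_menu_alt (filename : String) : String :=
  let active := pvFileToCat.get? filename
  let menu := "<div class=\"menu\">\n"
  let menu := pvRows.foldl (fun menu row =>
    let cls := if active == some row.2.1 then "tab-link active" else "tab-link"
    let data := if row.2.2.1 then " data-category=\"" ++ row.2.1 ++ "\"" else ""
    menu ++ "        <a href=\"" ++ row.1 ++ "\" class=\"" ++ cls ++ "\"" ++ data ++ ">" ++ row.2.2.2 ++ "</a>\n") menu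
  menu ++ "    </div>"

-- ===== PRECONDITION & SPEC =====
def Spec_get_new_menu (filename : String) (out : String) : Prop := out = get_new_menu_alt filename
instance (filename : String) (out : String) : Decidable (Spec_get_new_menu filename out) := by unfold Spec_get_new_menu; infer_instance

-- ===== CLAIM (what is proved, stated in full; the proofs are below) =====
def Claim_equal_get_new_menu : Prop := ∀ (filename : String), Dom_get_new_menu filename → Spec_get_new_menu filename (get_new_menu filename)

-- ===== LEMMAS AND PROOFS =====
set_option maxRecDepth 10000
set_option maxHeartbeats 1000000

-- A's menu text as a function of the already-computed active category
def pvMenuA (active_cat : Option String) : String :=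
  "<div class=\"menu\">\n"
  ++ "        <a href=\"essential-tours.html\" class=\"tab-link" ++ (if active_cat == some "essential" then " active" else "") ++ "\" data-category=\"essential\">보라카이 필수투어</a>\n"
  ++ "        <a href=\"activities.html\" class=\"tab-link" ++ (if active_cat == some "activity" then " active" else "") ++ "\" data-category=\"activity\">액티비티</a>\n"
  ++ "        <a href=\"massage.html\" class=\"tab-link" ++ (if active_cat == some "massage" then " active" else "") ++ "\" data-category=\"massage\">마사지</a>\n"
  ++ "        <a href=\"price-list.html\" class=\"tab-link" ++ (if active_cat == some "price-list" then " active" else "") ++ "\">한눈에 요금표</a>\n"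
  ++ "        <a href=\"cart.html\" class=\"tab-link" ++ (if active_cat == some "cart" then " active" else "") ++ "\">장바구니</a>\n"
  ++ "    </div>"

-- B's menu text as a function of the already-computed active category
def pvMenuB (active : Option String) : String :=
  (pvRows.foldl (fun menu row =>
    let cls := if active == some row.2.1 then "tab-link active" else "tab-link"
    let data := if row.2.2.1 then " data-category=\"" ++ row.2.1 ++ "\"" else ""
    menu ++ "        <a href=\"" ++ row.1 ++ "\" class=\"" ++ cls ++ "\"" ++ data ++ ">" ++ row.2.2.2 ++ "</a>\n") "<div class=\"menu\">\n")
  ++ "    </div>"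

theorem pvA_as_menu (f : String) : get_new_menu f = pvMenuA (pvFindCat pvMapping f) := rfl

theorem pvB_as_menu (f : String) : get_new_menu_alt f = pvMenuB (pvFileToCat.get? f) := rfl

theorem pvCls_split (c : Prop) [inst : Decidable c] :
    (if c then "tab-link active" else "tab-link") = "tab-link" ++ (if c then " active" else "") := by
  split_ifs <;> rfl

theorem pvMenu_eq (o : Option String) : pvMenuA o = pvMenuB o := by
  apply String.ext
  simp [pvMenuA, pvMenuB, pvRows, List.foldl, pvCls_split]

theorem pvLookup_eq (f : String) : pvFindCat pvMapping f = pvFileToCat.get? f := by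
  by_cases h1 : f = "essential-tours.html"
  · subst h1; decide
  by_cases h2 : f = "pickup-sending.html"
  · subst h2; decide
  by_cases h3 : f = "hopping-tour.html"
  · subst h3; decide
  by_cases h4 : f = "malumpati.html"
  · subst h4; decide
  by_cases h5 : f = "activities.html"
  · subst h5; decide
  by_cases h6 : f = "freediving.html"
  · subst h6; decide
  by_cases h7 : f = "land-tour.html"
  · subst h7; decide
  by_cases h8 : f = "jl-snap.html"
  · subst h8; decide
  by_cases h9 : f = "bora-ajae-hopping.html"
  · subst h9; decide
  by_cases h10 : f = "parasailing.html"
  · subst h10; decide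
  by_cases h11 : f = "scuba-diving.html"
  · subst h11; decide
  by_cases h12 : f = "helmet-diving.html"
  · subst h12; decide
  by_cases h13 : f = "jetski.html"
  · subst h13; decide
  by_cases h14 : f = "island-tour.html"
  · subst h14; decide
  by_cases h15 : f = "massage.html"
  · subst h15; decide
  by_cases h16 : f = "aspa.html"
  · subst h16; decide
  by_cases h17 : f = "spa.html"
  · subst h17; decide
  by_cases h18 : f = "poseidon.html"
  · subst h18; decide
  by_cases h19 : f = "maris.html"
  · subst h19; decide
  by_cases h20 : f = "kabayan.html"
  · subst h20; decide
  by_cases h21 : f = "luna.html"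
  · subst h21; decide
  by_cases h22 : f = "boraspa.html"
  · subst h22; decide
  by_cases h23 : f = "helios.html"
  · subst h23; decide
  by_cases h24 : f = "price-list.html"
  · subst h24; decide
  by_cases h25 : f = "cart.html"
  · subst h25; decide
  simp [pvFindCat, pvMapping, pvFileToCat, pvMappingB, List.foldl,
        PySem.Dict.get?_insert, PySem.Dict.get?_empty, h1, h2, h3, h4, h5, h6, h7, h8, h9, h10, h11, h12, h13, h14, h15, h16, h17, h18, h19, h20, h21, h22, h23, h24, h25]

-- ===== VERDICT (by name: the statement is the Claim_ definition above) =====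
theorem get_new_menu_spec : Claim_equal_get_new_menu := by
  intro f _
  show get_new_menu f = get_new_menu_alt f
  rw [pvA_as_menu, pvB_as_menu, pvLookup_eq, pvMenu_eq]
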